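-- pv_equiv track=rewrite | github.com/dok2d/aria-standalone-sandbox | ai_home/tools/introspect.py | code_vs_prose
-- ===== SOURCE A (Python) =====
-- def code_vs_prose(texts):
--     """Соотношение строк кода и прозы в артефактах."""
--     code_lines = 0
--     prose_lines = 0
--     in_code_block = False
--
--     for name, text in texts.items():
--         if not name.endswith(".md"):
--             continue
--         for line in text.split("\n"):
--             if line.strip().startswith("```"):
--                 in_code_block = not in_code_block
--                 continue
--             if in_code_block:
--                 code_lines += 1
--             elif line.strip():
--                 prose_lines += 1
--
--     return code_lines, prose_lines
-- ===== SOURCE B (Python) =====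
-- def code_vs_prose(texts):
--     """Соотношение строк кода и прозы в артефактах."""
--     lines = [line
--              for name, text in texts.items() if name.endswith(".md")
--              for line in text.split("\n")]
--     code_lines = 0
--     prose_lines = 0
--     in_code_block = False
--     i = 0
--     n = len(lines)
--     while i < n:
--         j = i
--         while j < n and not lines[j].strip().startswith("```"):
--             j += 1
--         seg = lines[i:j]
--         if in_code_block:
--             code_lines += len(seg)
--         else:
--             prose_lines += sum(1 for l in seg if l.strip())
--         in_code_block = not in_code_block
--         i = j + 1
--     return code_lines, prose_lines
-- ===== Notes on version B (the rewrite author's own statement) =====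
-- stated objective: alternative
-- what changed: B flattens all .md texts into one line list, locates the next fence with an inner scan, and counts whole fence-delimited segments at once (length for code segments, non-blank count for prose segments), instead of A's per-line boolean toggle inside nested file/line loops.
import Mathlib
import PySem

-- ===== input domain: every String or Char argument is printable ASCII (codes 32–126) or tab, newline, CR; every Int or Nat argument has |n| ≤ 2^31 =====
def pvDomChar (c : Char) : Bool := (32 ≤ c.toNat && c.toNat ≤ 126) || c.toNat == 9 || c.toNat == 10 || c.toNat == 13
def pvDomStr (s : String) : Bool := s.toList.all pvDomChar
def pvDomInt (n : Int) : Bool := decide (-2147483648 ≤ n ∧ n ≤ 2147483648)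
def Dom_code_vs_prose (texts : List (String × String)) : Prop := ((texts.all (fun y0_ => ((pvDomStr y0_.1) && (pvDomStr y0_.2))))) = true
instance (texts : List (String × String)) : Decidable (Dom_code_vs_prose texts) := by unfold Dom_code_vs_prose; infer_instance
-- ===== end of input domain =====

-- B restructures A's per-line toggle into: flatten all .md files' lines once, then walk fence-delimited
-- segments, counting each segment in one step (alternative decomposition; same asymptotic cost).


-- shared predicates (the same Python expressions appear in both programs)
def cvpFence (line : String) : Bool := PySem.Str.startswith (PySem.Str.strip line) "```"
def cvpBlank (line : String) : Bool := PySem.Str.len (PySem.Str.strip line) == 0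

-- ===== PORT A =====
-- A's per-line state update: (code_lines, prose_lines, in_code_block)
def cvpStep (s : Int × Int × Bool) (line : String) : Int × Int × Bool :=
  if cvpFence line then (s.1, s.2.1, !s.2.2)
  else if s.2.2 then (s.1 + 1, s.2.1, s.2.2)
  else if cvpBlank line then s
  else (s.1, s.2.1 + 1, s.2.2)

def code_vs_prose (texts : List (String × String)) : Int × Int :=
  let fin := texts.foldl
    (fun (st : Int × Int × Bool) nt =>
      if PySem.Str.endswith nt.1 ".md" then
        ((PySem.Str.split? nt.2 "\n").getD []).foldl cvpStep st
      else st)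
    ((0 : Int), (0 : Int), false)
  (fin.1, fin.2.1)

-- ===== PORT B =====
def cvpLines (texts : List (String × String)) : List String :=
  (texts.filter (fun nt => PySem.Str.endswith nt.1 ".md")).flatMap
    (fun nt => (PySem.Str.split? nt.2 "\n").getD [])

def cvpSegCount (seg : List String) : Int := (seg.filter (fun l => !cvpBlank l)).length

-- segment walk: take the lines up to the next fence, count them in one step, toggle, recurse
def cvpGo (lines : List String) (inCode : Bool) : Int × Int :=
  let seg := lines.takeWhile (fun l => !cvpFence l)
  let segVal : Int := if inCode then (seg.length : Int) else cvpSegCount seg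
  match _h : lines.dropWhile (fun l => !cvpFence l) with
  | [] => if inCode then (segVal, 0) else (0, segVal)
  | _ :: rest =>
    let r := cvpGo rest (!inCode)
    if inCode then (segVal + r.1, r.2) else (r.1, segVal + r.2)
termination_by lines.length
decreasing_by
  have hle := List.length_dropWhile_le (fun l => !cvpFence l) lines
  rw [_h] at hle; simp at hle; omega

def code_vs_prose_alt (texts : List (String × String)) : Int × Int :=
  cvpGo (cvpLines texts) false

-- ===== PRECONDITION & SPEC =====
def Spec_code_vs_prose (texts : List (String × String)) (out : Int × Int) : Prop := out = code_vs_prose_alt texts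
instance (texts : List (String × String)) (out : Int × Int) : Decidable (Spec_code_vs_prose texts out) := by unfold Spec_code_vs_prose; infer_instance

-- ===== CLAIM (what is proved, stated in full; the proofs are below) =====
def Claim_equal_code_vs_prose : Prop := ∀ (texts : List (String × String)), Dom_code_vs_prose texts → Spec_code_vs_prose texts (code_vs_prose texts)

-- ===== LEMMAS AND PROOFS =====

lemma cvpGo_nil (lines : List String) (b : Bool)
    (h : lines.dropWhile (fun l => !cvpFence l) = []) :
    cvpGo lines b =
      if b then (((lines.takeWhile (fun l => !cvpFence l)).length : Int), 0)
      else (0, cvpSegCount (lines.takeWhile (fun l => !cvpFence l))) := by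
  rw [cvpGo]
  split
  next heq => cases b <;> simp
  next heq => rw [h] at heq; simp at heq

lemma cvpGo_cons (lines : List String) (b : Bool) (f : String) (rest : List String)
    (h : lines.dropWhile (fun l => !cvpFence l) = f :: rest) :
    cvpGo lines b =
      if b then
        (((lines.takeWhile (fun l => !cvpFence l)).length : Int) + (cvpGo rest (!b)).1,
          (cvpGo rest (!b)).2)
      else
        ((cvpGo rest (!b)).1,
          cvpSegCount (lines.takeWhile (fun l => !cvpFence l)) + (cvpGo rest (!b)).2) := by
  rw [cvpGo]
  split
  next heq => rw [h] at heq; simp at heq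
  next f' rest' heq =>
    rw [h] at heq
    injection heq with h1 h2
    subst h1; subst h2
    cases b <;> simp

-- A's fold over a fenceless segment adds the segment in one step and keeps the flag
lemma foldl_noFence (seg : List String) (c p : Int) (b : Bool)
    (h : ∀ l ∈ seg, cvpFence l = false) :
    seg.foldl cvpStep (c, p, b) =
      (if b then (c + (seg.length : Int), p, b) else (c, p + cvpSegCount seg, b)) := by
  induction seg generalizing c p with
  | nil => cases b <;> simp [cvpSegCount]
  | cons l t ih =>
    have hl : cvpFence l = false := h l (by simp)
    have ht : ∀ x ∈ t, cvpFence x = false := fun x hx => h x (by simp [hx])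
    cases b with
    | true =>
      simp only [List.foldl_cons, cvpStep, hl, if_true, if_false, Bool.false_eq_true]
      rw [ih _ _ ht]
      simp
      ring
    | false =>
      by_cases hb : cvpBlank l = true
      · simp only [List.foldl_cons, cvpStep, hl]
        rw [if_neg (by simp), if_neg (by simp), if_pos hb, ih _ _ ht]
        simp [cvpSegCount, hb]
      · simp only [List.foldl_cons, cvpStep, hl]
        rw [if_neg (by simp), if_neg (by simp), if_neg hb, ih _ _ ht]
        simp only [if_neg (by simp : ¬ (false = true))]
        simp [cvpSegCount, hb]
        ring

lemma dropWhile_head_false {p : String → Bool} {l : List String} {x : String} {xs : List String}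
    (h : l.dropWhile p = x :: xs) : p x = false := by
  induction l with
  | nil => simp at h
  | cons a t ih =>
    rw [List.dropWhile_cons] at h
    by_cases hp : p a = true
    · rw [if_pos hp] at h; exact ih h
    · rw [if_neg hp] at h
      cases h; simpa using hp

-- main invariant: A's single fold equals B's segment walk (flag existential)
lemma foldl_cvpGo (n : Nat) : ∀ (lines : List String), lines.length ≤ n → ∀ (b : Bool) (c p : Int),
    ∃ b', lines.foldl cvpStep (c, p, b) =
      (c + (cvpGo lines b).1, p + (cvpGo lines b).2, b') := by
  induction n with
  | zero =>
    intro lines hlen b c p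
    have hnil : lines = [] := List.eq_nil_of_length_eq_zero (Nat.le_zero.mp hlen)
    subst hnil
    refine ⟨b, ?_⟩
    rw [cvpGo_nil [] b (by simp)]
    cases b <;> simp [cvpSegCount]
  | succ n ih =>
    intro lines hlen b c p
    have hsplit := List.takeWhile_append_dropWhile (p := fun l => !cvpFence l) (l := lines)
    have hseg : ∀ l ∈ lines.takeWhile (fun l => !cvpFence l), cvpFence l = false := by
      intro l hl
      have := List.mem_takeWhile_imp hl
      simpa using this
    cases hrest : lines.dropWhile (fun l => !cvpFence l) with
    | nil =>
      have hlines : lines.takeWhile (fun l => !cvpFence l) = lines := by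
        rw [hrest] at hsplit; simpa using hsplit
      refine ⟨b, ?_⟩
      have hfold := foldl_noFence (lines.takeWhile (fun l => !cvpFence l)) c p b hseg
      rw [hlines] at hfold
      rw [hfold, cvpGo_nil lines b hrest, hlines]
      cases b <;> simp
    | cons f rest =>
      have hf : cvpFence f = true := by
        have := dropWhile_head_false hrest
        simpa using this
      have hlines : lines = lines.takeWhile (fun l => !cvpFence l) ++ f :: rest := by
        rw [← hrest]; exact hsplit.symm
      have hrlen : rest.length ≤ n := by
        have := congrArg List.length hlines
        simp at this; omega
      have hfold := foldl_noFence (lines.takeWhile (fun l => !cvpFence l)) c p b hseg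
      rw [cvpGo_cons lines b f rest hrest]
      set sg := lines.takeWhile (fun l => !cvpFence l) with hsg
      rw [hlines, List.foldl_append, hfold]
      cases b with
      | true =>
        rw [if_pos rfl, if_pos rfl]
        simp only [List.foldl_cons, cvpStep, if_pos hf]
        obtain ⟨b', hb'⟩ := ih rest hrlen false (c + _) p
        refine ⟨b', ?_⟩
        simp only [Bool.not_true] at *
        rw [hb']
        simp [add_assoc]
      | false =>
        rw [if_neg (by simp), if_neg (by simp)]
        simp only [List.foldl_cons, cvpStep, if_pos hf]
        obtain ⟨b', hb'⟩ := ih rest hrlen true c (p + _)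
        refine ⟨b', ?_⟩
        simp only [Bool.not_false] at *
        rw [hb']
        simp [add_assoc]

-- A's nested fold over texts = single fold over the flattened .md lines
lemma foldl_texts (texts : List (String × String)) (st : Int × Int × Bool) :
    texts.foldl
      (fun (st : Int × Int × Bool) nt =>
        if PySem.Str.endswith nt.1 ".md" then
          ((PySem.Str.split? nt.2 "\n").getD []).foldl cvpStep st
        else st) st
    = (cvpLines texts).foldl cvpStep st := by
  induction texts generalizing st with
  | nil => simp [cvpLines]
  | cons nt t ih =>
    by_cases h : PySem.Str.endswith nt.1 ".md" = true
    · simp only [List.foldl_cons, ih, cvpLines, List.filter_cons, h, List.flatMap_cons,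
        List.foldl_append, if_true]
    · have hih := ih st
      simp only [cvpLines] at hih ⊢
      simp only [List.foldl_cons, List.filter_cons]
      rw [if_neg h, if_neg h]
      exact hih

-- ===== VERDICT (by name: the statement is the Claim_ definition above) =====
theorem code_vs_prose_spec : Claim_equal_code_vs_prose := by
  intro texts _
  unfold Spec_code_vs_prose code_vs_prose code_vs_prose_alt
  rw [foldl_texts]
  obtain ⟨b', hb'⟩ := foldl_cvpGo (cvpLines texts).length (cvpLines texts) le_rfl false 0 0
  rw [hb']
  simp
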